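-- pv_equiv track=rewrite | github.com/leodan52/Objeto_NumeroRacional | TOOLS/fraccion.py | SubStr_repetida
-- ===== SOURCE A (Python) =====
-- def SubStr_repetida(cadena):
-- 	largo = len(cadena)
-- 	maximo = largo//2 + 1
-- 	len_patron = 1
-- 	Mas_repite = 1
-- 	salida = "Nada"
--
-- 	subcadenas = dict()
--
-- 	for m in range(1,largo):
-- 		substr = cadena[-m:]
-- 		subcadenas[substr] = 0
--
-- 		if m >= maximo+1:
-- 			break
--
-- 		for n in range(m, largo+1, m):
-- 			check = cadena[-n:]
-- 			factor = n//m
-- 			if substr*factor == check: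
-- 				subcadenas[substr] += 1
-- 			else:
-- 				break
--
-- 	for sub in subcadenas:
-- 		if subcadenas[sub] > Mas_repite:
-- 			Mas_repite = subcadenas[sub]
-- 			salida = sub
--
-- 	return salida, Mas_repite
-- ===== SOURCE B (Python) =====
-- def SubStr_repetida(cadena):
-- 	# Z-function of the reversed string: z[m] = length of the longest common prefix
-- 	# of t and t[m:], i.e. the longest common suffix of cadena[:-m] and cadena[m:].
-- 	# The suffix block of length m then repeats z[m]//m + 1 times; keep the first
-- 	# block length with the maximal count.
-- 	n = len(cadena)
-- 	t = cadena[::-1]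
-- 	z = [0] * n
-- 	l = 0
-- 	r = 0
-- 	for i in range(1, n):
-- 		zi = 0
-- 		if i < r:
-- 			zi = min(r - i, z[i - l])
-- 		while i + zi < n and t[zi] == t[i + zi]:
-- 			zi += 1
-- 		z[i] = zi
-- 		if i + zi > r:
-- 			l = i
-- 			r = i + zi
-- 	best_m = 0
-- 	best_r = 1
-- 	for m in range(1, n // 2 + 1):
-- 		rr = z[m] // m + 1
-- 		if rr > best_r:
-- 			best_r = rr
-- 			best_m = m
-- 	if best_m == 0:
-- 		return "Nada", 1
-- 	return cadena[n - best_m:], best_r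
-- ===== Notes on version B (the rewrite author's own statement) =====
-- stated objective: faster
-- what changed: A tests each suffix block length m by rebuilding the repeated string substr*factor and comparing it against ever longer suffixes for every multiple of m; B computes the Z-function of the reversed string once in linear time and reads the repetition count of each block length m off as z[m]//m + 1.
import Mathlib
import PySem

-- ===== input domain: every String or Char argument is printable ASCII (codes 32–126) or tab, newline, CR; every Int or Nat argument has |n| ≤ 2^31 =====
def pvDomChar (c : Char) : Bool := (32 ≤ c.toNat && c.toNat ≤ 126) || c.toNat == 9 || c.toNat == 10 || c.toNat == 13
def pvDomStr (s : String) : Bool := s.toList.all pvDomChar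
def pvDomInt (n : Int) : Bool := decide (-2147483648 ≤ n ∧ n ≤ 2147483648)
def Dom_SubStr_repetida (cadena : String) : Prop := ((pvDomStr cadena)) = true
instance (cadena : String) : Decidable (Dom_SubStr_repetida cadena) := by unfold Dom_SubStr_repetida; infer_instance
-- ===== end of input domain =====

-- B replaces A's per-multiple build-and-compare of repeated suffix blocks by the Z-function
-- of the reversed string, read off as z[m]//m + 1 repetitions per block length (objective: faster).

-- ===== PORT A =====
-- Python "substr * factor" (string repetition); exact for factor ≥ 0, and A only reaches factor ≥ 1
def pyStrMul (s : List Char) : Nat → List Char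
  | 0 => []
  | k + 1 => s ++ pyStrMul s k

-- inner loop "for n in range(m, largo+1, m): …" with its break
def aInner (s : List Char) (m : Int) (substr : List Char)
    (ns : List Int) (d : PySem.Dict (List Char) Int) : PySem.Dict (List Char) Int :=
  match ns with
  | [] => d
  | n :: rest =>
    let check := PySem.List.slice s (some (-n)) none
    let factor := PySem.Int.floordiv n m
    -- `substr*factor == check`; factor ≥ 1 on every reached iteration so `.toNat` is exact;
    -- `subcadenas[substr] += 1`: the key is always present (set to 0 just before), so getD is exact
    if pyStrMul substr factor.toNat = check then
      aInner s m substr rest (d.insert substr (d.getD substr 0 + 1))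
    else d

-- outer loop "for m in range(1, largo): …" with its break
def aOuter (s : List Char) (largo maximo : Int)
    (ms : List Int) (d : PySem.Dict (List Char) Int) : PySem.Dict (List Char) Int :=
  match ms with
  | [] => d
  | m :: rest =>
    let substr := PySem.List.slice s (some (-m)) none
    let d1 := d.insert substr 0
    if m ≥ maximo + 1 then d1
    else aOuter s largo maximo rest
      (aInner s m substr (PySem.List.pyRange m (largo + 1) m) d1)

-- final loop "for sub in subcadenas: …"; `subcadenas[sub]` always present, getD exact
def aSelect (d : PySem.Dict (List Char) Int) (ks : List (List Char))
    (salida : List Char) (mas : Int) : List Char × Int :=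
  match ks with
  | [] => (salida, mas)
  | k :: rest =>
    if d.getD k 0 > mas then aSelect d rest k (d.getD k 0) else aSelect d rest salida mas

def SubStr_repetida (cadena : String) : String × Int :=
  let s := cadena.toList
  let largo := PySem.Chars.len s
  let maximo := PySem.Int.floordiv largo 2 + 1
  let subcadenas := aOuter s largo maximo (PySem.List.pyRange 1 largo 1) PySem.Dict.empty
  let r := aSelect subcadenas subcadenas.keys "Nada".toList 1
  (String.ofList r.1, r.2)

-- ===== PORT B =====
-- inner "while i + zi < n and t[zi] == t[i+zi]: zi += 1" of Source B; indices are read with a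
-- default exactly where Source B reads them in range, so getD is exact
def zWhile (t : List Char) (i : Nat) (zi : Nat) : Nat :=
  if i + zi < t.length ∧ t.getD zi ' ' = t.getD (i + zi) ' ' then zWhile t i (zi + 1) else zi
termination_by t.length - zi
decreasing_by omega

-- the Z-function loop "for i in range(1, n): …" of Source B, state (z, l, r)
def zLoop (t : List Char) (is_ : List Nat) (st : List Nat × Nat × Nat) : List Nat × Nat × Nat :=
  match is_ with
  | [] => st
  | i :: rest =>
    let z := st.1
    let l := st.2.1
    let r := st.2.2
    let zi0 := if i < r then min (r - i) (z.getD (i - l) 0) else 0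
    let zi := zWhile t i zi0
    let z' := z.set i zi
    if i + zi > r then zLoop t rest (z', i, i + zi) else zLoop t rest (z', l, r)

-- second loop "for m in range(1, n//2 + 1): …" of Source B
def bLoop (s : List Char) (n : Nat) (z : List Nat) (ms : List Nat) (best : Nat × Int) :
    Nat × Int :=
  match ms with
  | [] => best
  | m :: rest =>
    let r : Int := ((z.getD m 0 / m : Nat) : Int) + 1
    bLoop s n z rest (if r > best.2 then (m, r) else best)

def SubStr_repetida_alt (cadena : String) : String × Int :=
  let s := cadena.toList
  let n := s.length
  let t := s.reverse  -- cadena[::-1]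
  let z := (zLoop t (List.range' 1 (n - 1)) (List.replicate n 0, 0, 0)).1
  let best := bLoop s n z (List.range' 1 (n / 2)) (0, 1)
  if best.1 = 0 then ("Nada", 1) else (String.ofList (s.drop (n - best.1)), best.2)

-- ===== PRECONDITION & SPEC =====
def Spec_SubStr_repetida (cadena : String) (out : String × Int) : Prop := out = SubStr_repetida_alt cadena
instance (cadena : String) (out : String × Int) : Decidable (Spec_SubStr_repetida cadena out) := by unfold Spec_SubStr_repetida; infer_instance

-- ===== CLAIM (what is proved, stated in full; the proofs are below) =====
def Claim_equal_SubStr_repetida : Prop := ∀ (cadena : String), Dom_SubStr_repetida cadena → Spec_SubStr_repetida cadena (SubStr_repetida cadena)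

-- ===== LEMMAS AND PROOFS =====

-- proof-side abbreviations
def sufx (s : List Char) (m : Nat) : List Char := s.drop (s.length - m)

-- proof-side: run length of consecutive matches s[i] == s[i+m], descending from i = arg-1
def bRun (s : List Char) (m : Nat) : Nat → Nat
  | 0 => 0
  | i + 1 => if s.getD i ' ' = s.getD (i + m) ' ' then bRun s m i + 1 else 0

def runA (s : List Char) (m : Nat) : Nat → Nat → Nat
  | _, 0 => 0
  | k, fuel + 1 =>
    if pyStrMul (sufx s m) k = sufx s (k * m) then runA s m (k + 1) fuel + 1 else 0

def cntA (s : List Char) (m : Nat) : Int := (runA s m 1 (s.length / m) : Int)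

def tailI (s : List Char) (maximo : Nat) : Nat → Nat → List (List Char × Int)
  | 0, _ => []
  | fuel + 1, j =>
    if maximo + 1 ≤ j then [(sufx s j, 0)]
    else (sufx s j, cntA s j) :: tailI s maximo fuel (j + 1)

def selI : List (List Char × Int) → List Char × Int → List Char × Int
  | [], acc => acc
  | (k, v) :: rest, acc => selI rest (if v > acc.2 then (k, v) else acc)


theorem pyRange_pos_cons (a b st : Int) (hs : 0 < st) (hab : a < b) :
    PySem.List.pyRange a b st = a :: PySem.List.pyRange (a + st) b st := by

  rw [PySem.List.pyRange_of_pos _ _ hs, PySem.List.pyRange_of_pos _ _ hs, if_pos hab]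
  have harith : b - a + st - 1 = (b - (a + st) + st - 1) + 1 * st := by ring
  have h1 : (b - a + st - 1) / st = (b - (a + st) + st - 1) / st + 1 := by
    rw [harith, Int.add_mul_ediv_right _ _ (by omega : st ≠ 0)]
  by_cases h2 : a + st < b
  · rw [if_pos h2, h1, Int.toNat_add (Int.ediv_nonneg (by omega) (by omega)) (by norm_num)]
    simp only [Int.toNat_one]
    rw [List.range_succ_eq_map]
    simp only [List.map_cons, List.map_map, Nat.cast_zero, mul_zero, add_zero, List.cons.injEq]
    refine ⟨by trivial, List.map_congr_left ?_⟩
    intro k _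
    simp only [Function.comp_apply]
    push_cast
    ring
  · rw [if_neg h2, h1]
    have hz : (b - (a + st) + st - 1) / st = 0 := Int.ediv_eq_zero_of_lt (by omega) (by omega)
    rw [hz]
    norm_num [List.range_one]


theorem length_sufx (s : List Char) (m : Nat) (h : m ≤ s.length) : (sufx s m).length = m := by
  simp [sufx]; omega

theorem bRun_le (s : List Char) (m j : Nat) : bRun s m j ≤ j := by
  induction j with
  | zero => simp [bRun]
  | succ i ih =>
    simp only [bRun]
    split
    · omega
    · omega


theorem bRun_match (s : List Char) (m j : Nat) :
    ∀ i, j - bRun s m j ≤ i → i < j → s.getD i ' ' = s.getD (i + m) ' ' := by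
  induction j with
  | zero => intro i h1 h2; omega
  | succ i ih =>
    intro i' h1 h2
    simp only [bRun] at h1 ⊢
    split at h1
    · rename_i hmatch
      rcases Nat.lt_succ_iff_lt_or_eq.mp h2 with h | h
      · exact ih i' (by have := bRun_le s m i; omega) h
      · subst h; exact hmatch
    · omega


theorem bRun_stop (s : List Char) (m j : Nat) (h : bRun s m j < j) :
    s.getD (j - bRun s m j - 1) ' ' ≠ s.getD (j - bRun s m j - 1 + m) ' ' := by
  induction j with
  | zero => omega
  | succ i ih =>
    simp only [bRun] at h ⊢
    split at h
    · rename_i hmatch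
      have hle := bRun_le s m i
      have : bRun s m i < i := by omega
      have := ih this
      rw [if_pos hmatch]
      have heq : i + 1 - (bRun s m i + 1) - 1 = i - bRun s m i - 1 := by omega
      rw [heq]; exact this
    · rename_i hmatch
      rw [if_neg hmatch]
      simpa using hmatch


theorem seg_eq_iff (s : List Char) (p m : Nat) (h : p + m + m ≤ s.length) :
    ((s.drop p).take m = (s.drop (p + m)).take m)
      ↔ ∀ i, p ≤ i → i < p + m → s.getD i ' ' = s.getD (i + m) ' ' := by

  have hlen1 : ((s.drop p).take m).length = m := by simp; omega
  have hlen2 : ((s.drop (p + m)).take m).length = m := by simp; omega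
  constructor
  · intro he i h1 h2
    have hi : i - p < m := by omega
    have e1 : ((s.drop p).take m)[i - p]'(by omega) = ((s.drop (p + m)).take m)[i - p]'(by omega) := by
      simp only [he]
    simp only [List.getElem_take, List.getElem_drop] at e1
    rw [List.getD_eq_getElem s ' ' (by omega), List.getD_eq_getElem s ' ' (by omega)]
    exact (getElem_congr rfl (by omega : i = p + (i - p)) (by omega)).trans
      (e1.trans (getElem_congr rfl (by omega : p + m + (i - p) = i + m) (by omega)))
  · intro hp
    apply List.ext_getElem (by omega)
    intro i hi1 hi2
    simp only [List.getElem_take, List.getElem_drop]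
    have h3 := hp (p + i) (by omega) (by omega)
    rw [List.getD_eq_getElem s ' ' (by omega), List.getD_eq_getElem s ' ' (by omega)] at h3
    exact h3.trans (getElem_congr rfl (by omega : p + i + m = p + m + i) (by omega))


theorem rep_iff (s : List Char) (m k : Nat) (hm : 1 ≤ m) (hk : 1 ≤ k) (h : k * m ≤ s.length) :
    (pyStrMul (sufx s m) k = sufx s (k * m))
      ↔ ∀ i, s.length - k * m ≤ i → i < s.length - m → s.getD i ' ' = s.getD (i + m) ' ' := by

  revert h
  induction k, hk using Nat.le_induction with
  | base =>
    intro h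
    have h1 : pyStrMul (sufx s m) 1 = sufx s m := by simp [pyStrMul]
    simp only [one_mul, h1]
    constructor
    · intro _ i hi1 hi2; exact absurd hi2 (by omega)
    · intro _; trivial
  | succ k hk ih =>
    intro h
    have e1 : (k + 1) * m = k * m + m := Nat.succ_mul k m
    have e2 : m ≤ k * m := Nat.le_mul_of_pos_left m (by omega)
    have hkm : k * m ≤ s.length := by omega
    have hmn : m ≤ s.length := by omega
    have hsm : (sufx s m).length = m := length_sufx s m hmn
    have hlen2 : ((s.drop (s.length - (k + 1) * m)).take m).length = m := by simp; omega
    have hdec : sufx s ((k + 1) * m)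
        = (s.drop (s.length - (k + 1) * m)).take m ++ s.drop (s.length - k * m) := by
      show s.drop (s.length - (k + 1) * m) = _
      conv_lhs => rw [← List.take_append_drop m (s.drop (s.length - (k + 1) * m))]
      rw [List.drop_drop]
      congr 2
      omega
    have hpm : s.length - (k + 1) * m + m = s.length - k * m := by omega
    have hfb : pyStrMul (sufx s m) k = s.drop (s.length - k * m) →
        (s.drop (s.length - k * m)).take m = sufx s m := by
      intro hok
      rw [← hok]
      cases k with
      | zero => omega
      | succ k' =>
        show (sufx s m ++ pyStrMul (sufx s m) k').take m = sufx s m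
        have h4 : (sufx s m ++ pyStrMul (sufx s m) k').take (sufx s m).length = sufx s m :=
          List.take_left
        rw [hsm] at h4
        exact h4
    have hseg := seg_eq_iff s (s.length - (k + 1) * m) m (by omega)
    have hsplit : pyStrMul (sufx s m) (k + 1)
        = sufx s m ++ pyStrMul (sufx s m) k := rfl
    rw [hsplit, hdec]
    constructor
    · intro he i hi1 hi2
      have hB := (List.append_inj he (hsm.trans hlen2.symm)).1
      have hR := (List.append_inj he (hsm.trans hlen2.symm)).2
      by_cases hc : i < s.length - (k + 1) * m + m
      · refine hseg.mp ?_ i hi1 (by omega)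
        calc (s.drop (s.length - (k + 1) * m)).take m
            = sufx s m := hB.symm
          _ = (s.drop (s.length - k * m)).take m := (hfb hR).symm
          _ = (s.drop (s.length - (k + 1) * m + m)).take m := by rw [hpm]
      · exact (ih hkm).mp hR i (by omega) hi2
    · intro hC
      have hR : pyStrMul (sufx s m) k = s.drop (s.length - k * m) :=
        (ih hkm).mpr (fun i h1 h2 => hC i (by omega) h2)
      have hB : sufx s m = (s.drop (s.length - (k + 1) * m)).take m := by
        have := hseg.mpr (fun i h1 h2 => hC i (by omega) (by omega))
        calc sufx s m = (s.drop (s.length - k * m)).take m := (hfb hR).symm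
          _ = (s.drop (s.length - (k + 1) * m + m)).take m := by rw [hpm]
          _ = (s.drop (s.length - (k + 1) * m)).take m := by rw [← this]
      rw [← hB, ← hR]


theorem ok_iff_le (s : List Char) (m k : Nat) (hm : 1 ≤ m) (hk : 1 ≤ k)
    (h : k * m ≤ s.length) (hmn : m < s.length) :
    (pyStrMul (sufx s m) k = sufx s (k * m)) ↔ (k - 1) * m ≤ bRun s m (s.length - m) := by

  have e1 : (k - 1) * m + m = k * m := by
    have := Nat.succ_mul (k - 1) m
    have : (k - 1) + 1 = k := by omega
    calc (k - 1) * m + m = ((k - 1) + 1) * m := (Nat.succ_mul (k - 1) m).symm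
      _ = k * m := by rw [this]
  have hL := bRun_le s m (s.length - m)
  rw [rep_iff s m k hm hk h]
  constructor
  · intro hpt
    by_contra hlt
    rw [Nat.not_le] at hlt
    have hstop := bRun_stop s m (s.length - m) (by omega)
    exact hstop (hpt (s.length - m - bRun s m (s.length - m) - 1) (by omega) (by omega))
  · intro hle i h1 h2
    exact bRun_match s m (s.length - m) i (by omega) h2


theorem runA_thresh (s : List Char) (m : Nat) (K : Nat) :
    ∀ fuel k, 1 ≤ k → K + 1 ≤ k + fuel →
      (∀ j, k ≤ j → j < k + fuel →
        ((pyStrMul (sufx s m) j = sufx s (j * m)) ↔ j ≤ K)) →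
      runA s m k fuel = K + 1 - k := by

  intro fuel
  induction fuel with
  | zero =>
    intro k hk hK _
    simp only [runA]
    omega
  | succ fuel ih =>
    intro k hk hK hiff
    simp only [runA]
    by_cases hkK : k ≤ K
    · rw [if_pos ((hiff k (le_refl k) (by omega)).mpr hkK)]
      rw [ih (k + 1) (by omega) (by omega) (fun j hj1 hj2 => hiff j (by omega) (by omega))]
      omega
    · rw [if_neg ?_]
      · omega
      · intro hok
        exact hkK ((hiff k (le_refl k) (by omega)).mp hok)


theorem cnt_eq (s : List Char) (m : Nat) (hm : 1 ≤ m) (hmn : m < s.length) :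
    runA s m 1 (s.length / m) = bRun s m (s.length - m) / m + 1 := by
  have hm0 : 0 < m := hm
  have hL := bRun_le s m (s.length - m)
  have h1 : (bRun s m (s.length - m) / m) * m ≤ bRun s m (s.length - m) :=
    Nat.div_mul_le_self _ m
  have h2 : (bRun s m (s.length - m) / m + 1) * m ≤ s.length := by
    have hh : (bRun s m (s.length - m) / m + 1) * m = bRun s m (s.length - m) / m * m + m := by
      ring
    omega
  have hKle : bRun s m (s.length - m) / m + 1 ≤ s.length / m :=
    (Nat.le_div_iff_mul_le hm0).mpr h2
  have hiff : ∀ j, 1 ≤ j → j < 1 + s.length / m →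
      ((pyStrMul (sufx s m) j = sufx s (j * m)) ↔ j ≤ bRun s m (s.length - m) / m + 1) := by
    intro j hj1 hj2
    have hjm : j * m ≤ s.length := (Nat.le_div_iff_mul_le hm0).mp (by omega)
    rw [ok_iff_le s m j hm hj1 hjm hmn]
    constructor
    · intro hle
      have := (Nat.le_div_iff_mul_le hm0).mpr hle
      omega
    · intro hle
      have h3 : (j - 1) * m ≤ (bRun s m (s.length - m) / m) * m :=
        Nat.mul_le_mul_right m (by omega)
      omega
  have hr := runA_thresh s m (bRun s m (s.length - m) / m + 1) (s.length / m) 1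
    (by omega) (by omega) hiff
  exact hr.trans (Nat.add_sub_cancel _ _)

theorem cnt_one (s : List Char) (m : Nat) (hm : s.length / 2 < m) (hmn : m < s.length) :
    runA s m 1 (s.length / m) = 1 := by

  have hL := bRun_le s m (s.length - m)
  have hlt : bRun s m (s.length - m) < m := by omega
  have h1 := cnt_eq s m (by omega) hmn
  rw [h1, Nat.div_eq_of_lt hlt]


theorem insert_getD_self_eq (d : PySem.Dict (List Char) Int) (k : List Char)
    (hnd : d.keys.Nodup) (hc : d.contains k = true) :
    d.insert k (d.getD k 0) = d := by
  apply PySem.Dict.ext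
  rw [PySem.Dict.items_insert_of_contains d _ hc]
  have hcongr : ∀ p ∈ d.items,
      (if p.1 == k then (k, d.getD k 0) else p) = p := by
    intro p hp
    by_cases h : p.1 = k
    · have hmem : (p.1, p.2) ∈ d.items := by simpa using hp
      have hval := PySem.Dict.getD_of_mem_items d hmem hnd 0
      simp only [h, BEq.rfl, if_pos]
      rw [← h, hval]
    · simp [h]
  rw [List.map_congr_left hcongr]
  exact List.map_id' _

theorem inner_eq (s : List Char) (m : Nat) (hm : 1 ≤ m) :
    ∀ fuel k d, 1 ≤ k → s.length / m + 1 = k + fuel →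
      d.contains (sufx s m) = true → d.keys.Nodup →
      aInner s (m : Int) (sufx s m) (PySem.List.pyRange ((k * m : Nat) : Int) ((s.length : Int) + 1) (m : Int)) d
        = d.insert (sufx s m) (d.getD (sufx s m) 0 + (runA s m k fuel : Int)) := by

  have hm0 : 0 < m := hm
  intro fuel
  induction fuel with
  | zero =>
    intro k d hk hfk hc hnd
    have hgt : s.length < k * m := by
      have h1 : s.length / m < k := by omega
      have := (Nat.div_lt_iff_lt_mul hm0).mp h1
      omega
    have hnil : PySem.List.pyRange ((k * m : Nat) : Int) ((s.length : Int) + 1) (m : Int) = [] := by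
      rw [PySem.List.pyRange_of_pos _ _ (by exact_mod_cast hm0)]
      rw [if_neg (by push_cast; omega)]
      simp
    rw [hnil]
    show d = _
    simp only [runA, Nat.cast_zero, add_zero]
    exact (insert_getD_self_eq d _ hnd hc).symm
  | succ fuel ih =>
    intro k d hk hfk hc hnd
    have hkm : k * m ≤ s.length := by
      have h1 : k ≤ s.length / m := by omega
      exact (Nat.le_div_iff_mul_le hm0).mp h1
    have hcons := pyRange_pos_cons ((k * m : Nat) : Int) ((s.length : Int) + 1) (m : Int)
      (by exact_mod_cast hm0) (by push_cast; omega)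
    have hcast : ((k * m : Nat) : Int) + (m : Int) = (((k + 1) * m : Nat) : Int) := by
      push_cast; ring
    rw [hcons, hcast]
    simp only [aInner]
    have hchk : PySem.List.slice s (some (-((k * m : Nat) : Int))) none = sufx s (k * m) :=
      PySem.List.slice_from_neg_natCast s (k * m) (by positivity)
    have hfac : (PySem.Int.floordiv ((k * m : Nat) : Int) (m : Int)).toNat = k := by
      rw [PySem.Int.floordiv_natCast, Nat.mul_div_cancel k hm0, Int.toNat_natCast]
    rw [hchk, hfac]
    simp only [runA]
    by_cases hok : pyStrMul (sufx s m) k = sufx s (k * m)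
    · rw [if_pos hok, if_pos hok]
      rw [ih (k + 1) (d.insert (sufx s m) (d.getD (sufx s m) 0 + 1)) (by omega) (by omega)
        (PySem.Dict.contains_insert_self d _ _) (PySem.Dict.nodup_keys_insert d _ _ hnd)]
      rw [PySem.Dict.getD_insert_self, PySem.Dict.insert_insert_self]
      congr 1
      push_cast
      ring
    · rw [if_neg hok, if_neg hok]
      simp only [Nat.cast_zero, add_zero]
      exact (insert_getD_self_eq d _ hnd hc).symm


theorem sufx_ne (s : List Char) (a b : Nat) (ha : a ≤ s.length) (hb : b ≤ s.length)
    (hne : a ≠ b) : sufx s a ≠ sufx s b := by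
  intro h
  have hlen := congrArg List.length h
  rw [length_sufx s a ha, length_sufx s b hb] at hlen
  exact hne hlen

theorem outer_eq (s : List Char) :
    ∀ fuel j (d : PySem.Dict (List Char) Int), 1 ≤ j → j + fuel = s.length →
      (∀ m', j ≤ m' → m' ≤ s.length → d.contains (sufx s m') = false) → d.keys.Nodup →
      (aOuter s (s.length : Int) (((s.length / 2 : Nat) : Int) + 1)
          (PySem.List.pyRange (j : Int) (s.length : Int) 1) d).items
        = d.items ++ tailI s (s.length / 2 + 1) fuel j := by

  intro fuel
  induction fuel with
  | zero =>
    intro j d hj hjf hfresh hnd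
    have hj_eq : (j : Int) = (s.length : Int) := by exact_mod_cast (by omega : j = s.length)
    rw [hj_eq, PySem.List.pyRange_one_eq_nil le_rfl]
    simp [aOuter, tailI]
  | succ fuel ih =>
    intro j d hj hjf hfresh hnd
    have hjn : j < s.length := by omega
    have hcons : PySem.List.pyRange (j : Int) (s.length : Int) 1
        = (j : Int) :: PySem.List.pyRange ((j : Int) + 1) (s.length : Int) 1 :=
      PySem.List.pyRange_one_cons (by exact_mod_cast hjn)
    rw [hcons]
    simp only [aOuter]
    have hsub : PySem.List.slice s (some (-(j : Int))) none = sufx s j :=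
      PySem.List.slice_from_neg_natCast s j (by omega)
    rw [hsub]
    have hfr : d.contains (sufx s j) = false := hfresh j le_rfl (by omega)
    by_cases hbr : (j : Int) ≥ ((s.length / 2 : Nat) : Int) + 1 + 1
    · rw [if_pos hbr]
      rw [PySem.Dict.items_insert_of_not_contains d _ hfr]
      have hbrN : s.length / 2 + 1 + 1 ≤ j := by exact_mod_cast hbr
      simp only [tailI]
      rw [if_pos (by omega : s.length / 2 + 1 + 1 ≤ j)]
  -- rest of the else branch
    · rw [if_neg hbr]
      have hbrN : ¬ (s.length / 2 + 1 + 1 ≤ j) := by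
        intro hcon
        exact hbr (by exact_mod_cast hcon)
      have hin := inner_eq s j (by omega) (s.length / j) 1 (d.insert (sufx s j) 0)
        (by omega) (by omega) (PySem.Dict.contains_insert_self d _ _)
        (PySem.Dict.nodup_keys_insert d _ _ hnd)
      rw [show ((1 * j : Nat) : Int) = (j : Int) by push_cast; ring] at hin
      rw [hin, PySem.Dict.getD_insert_self, PySem.Dict.insert_insert_self, zero_add]
      have hstep : (j : Int) + 1 = ((j + 1 : Nat) : Int) := by push_cast; ring
      rw [hstep]
      rw [ih (j + 1) (d.insert (sufx s j) ((runA s j 1 (s.length / j) : Nat) : Int))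
        (by omega) (by omega) ?_ (PySem.Dict.nodup_keys_insert d _ _ hnd)]
      · rw [PySem.Dict.items_insert_of_not_contains d _ hfr]
        simp only [tailI]
        rw [if_neg hbrN]
        rw [List.append_assoc]
        rfl
      · intro m' hm1 hm2
        rw [PySem.Dict.contains_insert]
        have hne : sufx s m' ≠ sufx s j := sufx_ne s m' j hm2 (by omega) (by omega)
        rw [beq_eq_false_iff_ne.mpr hne]
        simp [hfresh m' (by omega) hm2]


theorem tailI_len (s : List Char) (M : Nat) :
    ∀ fuel j, j + fuel = s.length → 1 ≤ j →
      ∀ kv ∈ tailI s M fuel j, j ≤ kv.1.length ∧ kv.1.length ≤ s.length ∧ kv.1 = sufx s kv.1.length := by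

  intro fuel
  induction fuel with
  | zero => intro j _ _ kv hkv; simp [tailI] at hkv
  | succ fuel ih =>
    intro j hjf hj kv hkv
    have hjn : j < s.length := by omega
    simp only [tailI] at hkv
    split at hkv
    · simp only [List.mem_singleton] at hkv
      subst hkv
      have hl := length_sufx s j (by omega)
      simp only [hl]
      exact ⟨le_rfl, by omega, by trivial⟩
    · rcases List.mem_cons.mp hkv with h | h
      · subst h
        have hl := length_sufx s j (by omega)
        simp only [hl]
        exact ⟨le_rfl, by omega, by trivial⟩
      · have := ih (j + 1) (by omega) (by omega) kv h
        exact ⟨by omega, this.2.1, this.2.2⟩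


theorem tailI_nodup (s : List Char) (M : Nat) :
    ∀ fuel j, j + fuel = s.length → 1 ≤ j →
      ((tailI s M fuel j).map Prod.fst).Nodup := by

  intro fuel
  induction fuel with
  | zero => intro j _ _; simp [tailI]
  | succ fuel ih =>
    intro j hjf hj
    have hjn : j < s.length := by omega
    simp only [tailI]
    split
    · simp
    · simp only [List.map_cons, List.nodup_cons]
      refine ⟨?_, ih (j + 1) (by omega) (by omega)⟩
      intro hmem
      rcases List.mem_map.mp hmem with ⟨kv, hkv, hfst⟩
      have hlen := tailI_len s M fuel (j + 1) (by omega) (by omega) kv hkv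
      have h1 := length_sufx s j (by omega)
      have : kv.1.length = j := by rw [hfst, h1]
      omega


theorem select_eq_selI (d : PySem.Dict (List Char) Int) :
    ∀ pairs sal mas, (∀ kv ∈ pairs, d.getD kv.1 0 = kv.2) →
      aSelect d (pairs.map Prod.fst) sal mas = selI pairs (sal, mas) := by
  intro pairs
  induction pairs with
  | nil => intro sal mas _; rfl
  | cons kv rest ih =>
    intro sal mas hval
    obtain ⟨k, v⟩ := kv
    have hk : d.getD k 0 = v := hval (k, v) (by simp)
    simp only [List.map_cons, aSelect, selI, hk]
    by_cases hgt : v > mas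
    · rw [if_pos hgt, if_pos hgt]
      exact ih k v (fun kv hkv => hval kv (by simp [hkv]))
    · rw [if_neg hgt, if_neg hgt]
      exact ih sal mas (fun kv hkv => hval kv (by simp [hkv]))


theorem selI_const (s : List Char) :
    ∀ fuel j sal (br : Int), j + fuel = s.length → s.length / 2 < j → 1 ≤ br →
      selI (tailI s (s.length / 2 + 1) fuel j) (sal, br) = (sal, br) := by

  intro fuel
  induction fuel with
  | zero => intro j sal br _ _ _; rfl
  | succ fuel ih =>
    intro j sal br hjf hj hbr
    have hjn : j < s.length := by omega
    simp only [tailI]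
    split
    · simp only [selI]
      rw [if_neg (by omega)]
    · rename_i hM
      have hone : cntA s j = 1 := by
        have := cnt_one s j (by omega) (by omega)
        simp [cntA, this]
      simp only [selI, hone]
      rw [if_neg (by omega)]
      exact ih (j + 1) sal br (by omega) (by omega) hbr


theorem zWhile_ge (t : List Char) (i zi : Nat) : zi ≤ zWhile t i zi := by
  fun_induction zWhile t i zi with
  | case1 zi h ih => omega
  | case2 zi h => exact le_rfl

theorem zWhile_le (t : List Char) (i zi : Nat) (h : zi ≤ t.length - i) :
    zWhile t i zi ≤ t.length - i := by
  fun_induction zWhile t i zi with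
  | case1 zi hc ih => exact ih (by omega)
  | case2 zi hc => exact h

theorem zWhile_match (t : List Char) (i zi : Nat) :
    ∀ a, zi ≤ a → a < zWhile t i zi →
      i + a < t.length ∧ t.getD a ' ' = t.getD (i + a) ' ' := by
  fun_induction zWhile t i zi with
  | case1 zi hc ih =>
    intro a ha1 ha2
    rcases Nat.lt_or_ge zi a with h | h
    · exact ih a (by omega) ha2
    · have : a = zi := by omega
      subst this
      exact hc
  | case2 zi hc =>
    intro a ha1 ha2
    omega

theorem zWhile_stop (t : List Char) (i zi : Nat) :
    ¬ (i + zWhile t i zi < t.length ∧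
        t.getD (zWhile t i zi) ' ' = t.getD (i + zWhile t i zi) ' ') := by
  fun_induction zWhile t i zi with
  | case1 zi hc ih => exact ih
  | case2 zi hc => exact hc

theorem zWhile_eq_of_sound (t : List Char) (i zi : Nat)
    (hs : ∀ a, a < zi → i + a < t.length ∧ t.getD a ' ' = t.getD (i + a) ' ') :
    zWhile t i zi = zWhile t i 0 := by
  have g1 := zWhile_ge t i zi
  have m1 := zWhile_match t i zi
  have s1 := zWhile_stop t i zi
  have m0 := zWhile_match t i 0
  have s0 := zWhile_stop t i 0
  rcases lt_trichotomy (zWhile t i zi) (zWhile t i 0) with h | h | h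
  · exact absurd (m0 (zWhile t i zi) (Nat.zero_le _) h) s1
  · exact h
  · rcases Nat.lt_or_ge (zWhile t i 0) zi with h2 | h2
    · exact absurd (hs (zWhile t i 0) h2) s0
    · exact absurd (m1 (zWhile t i 0) h2 h) s0

theorem getD_reverse_char (s : List Char) (a : Nat) (h : a < s.length) :
    s.reverse.getD a ' ' = s.getD (s.length - 1 - a) ' ' := by
  rw [List.getD_eq_getElem _ ' ' (by simpa using h), List.getD_eq_getElem _ ' ' (by omega)]
  simp [List.getElem_reverse]

theorem zWhile_eq_bRun (s : List Char) (m : Nat) (hm : 1 ≤ m) (hmn : m ≤ s.length) :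
    zWhile s.reverse m 0 = bRun s m (s.length - m) := by
  have hc1 : zWhile s.reverse m 0 ≤ s.length - m := by
    have h0 := zWhile_le s.reverse m 0 (Nat.zero_le _)
    simpa using h0
  have hL := bRun_le s m (s.length - m)
  rcases lt_trichotomy (zWhile s.reverse m 0) (bRun s m (s.length - m)) with h | h | h
  · exfalso
    set c := zWhile s.reverse m 0 with hc
    have hmatch := bRun_match s m (s.length - m) (s.length - m - 1 - c) (by omega) (by omega)
    apply zWhile_stop s.reverse m 0
    rw [← hc]
    constructor
    · simp; omega
    · rw [getD_reverse_char s c (by omega), getD_reverse_char s (m + c) (by omega)]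
      have e1 : s.length - 1 - c = s.length - m - 1 - c + m := by omega
      have e2 : s.length - 1 - (m + c) = s.length - m - 1 - c := by omega
      rw [e1, e2]
      exact hmatch.symm
  · exact h
  · exfalso
    set c := zWhile s.reverse m 0 with hc
    set L := bRun s m (s.length - m) with hLd
    have hstop := bRun_stop s m (s.length - m) (by omega)
    have hmt := zWhile_match s.reverse m 0 L (Nat.zero_le _) h
    apply hstop
    rw [getD_reverse_char s L (by omega), getD_reverse_char s (m + L) (by omega)] at hmt
    have e2 : s.length - m - L - 1 + m = s.length - 1 - L := by omega
    have e1 : s.length - m - L - 1 = s.length - 1 - (m + L) := by omega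
    rw [e2, e1]
    exact hmt.2.symm

theorem set_getD_self (z : List Nat) (i v : Nat) (h : i < z.length) :
    (z.set i v).getD i 0 = v := by
  rw [List.getD_eq_getElem _ 0 (by simpa using h)]
  simp [List.getElem_set_self]

theorem set_getD_ne (z : List Nat) (i v j : Nat) (h : j ≠ i) :
    (z.set i v).getD j 0 = z.getD j 0 := by
  unfold List.getD
  rw [List.getElem?_set_ne (by omega)]

theorem zLoop_spec (t : List Char) :
    ∀ cnt i (z : List Nat) (l r : Nat), 1 ≤ i → i + cnt = t.length →
      z.length = t.length →
      (∀ j, 1 ≤ j → j < i → z.getD j 0 = zWhile t j 0) →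
      r ≤ t.length →
      (∀ a, a < r - l → t.getD a ' ' = t.getD (l + a) ' ') →
      (i < r → 1 ≤ l ∧ l < i) →
      ∀ j, 1 ≤ j → j < t.length →
        (zLoop t (List.range' i cnt) (z, l, r)).1.getD j 0 = zWhile t j 0 := by
  intro cnt
  induction cnt with
  | zero =>
    intro i z l r hi hcnt hlen hzj hr hwin hlr j hj1 hj2
    exact hzj j hj1 (by omega)
  | succ cnt ih =>
    intro i z l r hi hcnt hlen hzj hr hwin hlr j hj1 hj2
    rw [List.range'_succ]
    simp only [zLoop]
    have hin : i < t.length := by omega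
    have hsound : ∀ a, a < (if i < r then min (r - i) (z.getD (i - l) 0) else 0) →
        i + a < t.length ∧ t.getD a ' ' = t.getD (i + a) ' ' := by
      intro a ha
      split at ha
      · rename_i hir
        obtain ⟨hl1, hl2⟩ := hlr hir
        have hzk : z.getD (i - l) 0 = zWhile t (i - l) 0 := hzj (i - l) (by omega) (by omega)
        rw [hzk] at ha
        have hmz := zWhile_match t (i - l) 0 a (Nat.zero_le _) (by omega)
        refine ⟨by omega, ?_⟩
        have hw := hwin (i - l + a) (by omega)
        have e1 : l + (i - l + a) = i + a := by omega
        rw [e1] at hw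
        exact hmz.2.trans hw
      · omega
    have hzi : zWhile t i (if i < r then min (r - i) (z.getD (i - l) 0) else 0)
        = zWhile t i 0 := zWhile_eq_of_sound t i _ hsound
    rw [hzi]
    have hzle : zWhile t i 0 ≤ t.length - i := zWhile_le t i 0 (by omega)
    have hzj' : ∀ j', 1 ≤ j' → j' < i + 1 →
        (z.set i (zWhile t i 0)).getD j' 0 = zWhile t j' 0 := by
      intro j' h1 h2
      rcases Nat.lt_or_ge j' i with h | h
      · rw [set_getD_ne z i _ j' (by omega)]
        exact hzj j' h1 h
      · have : j' = i := by omega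
        subst this
        exact set_getD_self z j' _ (by omega)
    split
    · rename_i hgt
      exact ih (i + 1) _ i (i + zWhile t i 0) (by omega) (by omega) (by simpa using hlen)
        hzj' (by omega)
        (fun a ha => (zWhile_match t i 0 a (Nat.zero_le _) (by omega)).2)
        (fun _ => ⟨by omega, by omega⟩) j hj1 hj2
    · rename_i hle
      exact ih (i + 1) _ l r (by omega) (by omega) (by simpa using hlen)
        hzj' hr hwin (fun h => ⟨(hlr (by omega)).1, by omega⟩) j hj1 hj2

theorem sel_eq (s : List Char) (z : List Nat)
    (hz : ∀ j', 1 ≤ j' → j' < s.length → z.getD j' 0 = bRun s j' (s.length - j')) :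
    ∀ fuel j sal (bm : Nat) (br : Int), j + fuel = s.length → 1 ≤ j → j ≤ s.length / 2 + 1 →
      1 ≤ br → (bm = 0 → sal = "Nada".toList) → (bm ≠ 0 → sal = sufx s bm) →
      selI (tailI s (s.length / 2 + 1) fuel j) (sal, br)
        = ((fun best => (if best.1 = 0 then "Nada".toList else sufx s best.1, best.2))
            (bLoop s s.length z (List.range' j (s.length / 2 + 1 - j)) (bm, br))) := by

  intro fuel
  induction fuel with
  | zero =>
    intro j sal bm br hjf hj1 hj2 hbr h0 hne
    have hc : s.length / 2 + 1 - j = 0 := by omega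
    rw [hc]
    simp only [List.range', bLoop, tailI, selI]
    by_cases hbm : bm = 0
    · simp [hbm, h0 hbm]
    · simp [hbm, hne hbm]
  | succ fuel ih =>
    intro j sal bm br hjf hj1 hj2 hbr h0 hne
    have hjn : j < s.length := by omega
    by_cases hj3 : j ≤ s.length / 2
    · have hc : s.length / 2 + 1 - j = (s.length / 2 + 1 - (j + 1)) + 1 := by omega
      rw [hc, List.range'_succ]
      simp only [tailI, bLoop]
      rw [hz j (by omega) (by omega)]
      rw [if_neg (by omega : ¬ (s.length / 2 + 1 + 1 ≤ j))]
      simp only [selI]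
      have hv : cntA s j = ((bRun s j (s.length - j) / j : Nat) : Int) + 1 := by
        rw [cntA, cnt_eq s j (by omega) (by omega)]
        push_cast
        ring
      have hpos : (1 : Int) ≤ ((bRun s j (s.length - j) / j : Nat) : Int) + 1 := by
        have := Int.natCast_nonneg (bRun s j (s.length - j) / j)
        omega
      rw [hv]
      by_cases hgt : ((bRun s j (s.length - j) / j : Nat) : Int) + 1 > br
      · rw [if_pos hgt, if_pos hgt]
        exact ih (j + 1) (sufx s j) j _ (by omega) (by omega) (by omega) hpos
          (fun h => absurd h (by omega)) (fun _ => rfl)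
      · rw [if_neg hgt, if_neg hgt]
        exact ih (j + 1) sal bm br (by omega) (by omega) (by omega) hbr h0 hne
    · have hc : s.length / 2 + 1 - j = 0 := by omega
      rw [hc]
      simp only [List.range', bLoop]
      rw [selI_const s (fuel + 1) j sal br hjf (by omega) hbr]
      by_cases hbm : bm = 0
      · simp [hbm, h0 hbm]
      · simp [hbm, hne hbm]


theorem bLoop_zero (s : List Char) (n : Nat) (z : List Nat) :
    ∀ ms (best : Nat × Int), (∀ m ∈ ms, m ≠ 0) → (best.1 = 0 → best.2 = 1) →
      ((bLoop s n z ms best).1 = 0 → (bLoop s n z ms best).2 = 1) := by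
  intro ms
  induction ms with
  | nil => intro best _ h0 h; exact h0 h
  | cons m rest ih =>
    intro best hne h0
    simp only [bLoop]
    apply ih _ (fun x hx => hne x (by simp [hx]))
    intro hb
    split_ifs at hb ⊢ with hc
    · exact absurd hb (by simpa using hne m (by simp))
    · exact h0 hb


-- ===== VERDICT (by name: the statement is the Claim_ definition above) =====
theorem SubStr_repetida_spec : Claim_equal_SubStr_repetida := by
  intro cadena _
  show SubStr_repetida cadena = SubStr_repetida_alt cadena
  simp only [SubStr_repetida, SubStr_repetida_alt, PySem.Chars.len_eq]
  have hfd : PySem.Int.floordiv ((cadena.toList.length : Nat) : Int) 2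
      = ((cadena.toList.length / 2 : Nat) : Int) := by
    rw [show (2 : Int) = ((2 : Nat) : Int) by norm_num, PySem.Int.floordiv_natCast]
  rw [hfd]
  by_cases hn : cadena.toList.length = 0
  · rw [PySem.List.pyRange_one_eq_nil (by simp [hn])]
    simp only [aOuter, aSelect, hn, PySem.Dict.keys_empty, bLoop, Nat.zero_div,
      List.range']
    simp
  · have hfresh : ∀ m', 1 ≤ m' → m' ≤ cadena.toList.length →
        (PySem.Dict.empty : PySem.Dict (List Char) Int).contains (sufx cadena.toList m') = false :=
      fun m _ _ => PySem.Dict.contains_empty _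
    have hO := outer_eq cadena.toList (cadena.toList.length - 1) 1 PySem.Dict.empty le_rfl
      (by omega) hfresh PySem.Dict.nodup_keys_empty
    norm_num at hO
    set T := tailI cadena.toList (cadena.toList.length / 2 + 1) (cadena.toList.length - 1) 1
      with hT
    set D := aOuter cadena.toList ((cadena.toList.length : Nat) : Int)
      (((cadena.toList.length / 2 : Nat) : Int) + 1)
      (PySem.List.pyRange 1 ((cadena.toList.length : Nat) : Int) 1) PySem.Dict.empty with hD
    have hitems : D.items = T := by
      simpa using hO
    have hkeys : D.keys = T.map Prod.fst := by
      show D.items.map _ = _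
      rw [hitems]
    have hndT : (T.map Prod.fst).Nodup :=
      tailI_nodup cadena.toList (cadena.toList.length / 2 + 1) (cadena.toList.length - 1) 1
        (by omega) le_rfl
    have hndD : D.keys.Nodup := by rw [hkeys]; exact hndT
    have hsel : aSelect D D.keys "Nada".toList 1 = selI T ("Nada".toList, 1) := by
      rw [hkeys]
      apply select_eq_selI
      intro kv hkv
      exact PySem.Dict.getD_of_mem_items D (by rw [hitems]; simpa using hkv) hndD 0
    rw [hsel]
    have hz : ∀ j', 1 ≤ j' → j' < cadena.toList.length →
        ((zLoop cadena.toList.reverse (List.range' 1 (cadena.toList.length - 1))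
            (List.replicate cadena.toList.length 0, 0, 0)).1).getD j' 0
          = bRun cadena.toList j' (cadena.toList.length - j') := by
      intro j' h1 h2
      rw [zLoop_spec cadena.toList.reverse (cadena.toList.length - 1) 1
        (List.replicate cadena.toList.length 0) 0 0 le_rfl
        (by simp only [List.length_reverse]; omega) (by simp)
        (fun j hj1 hj2 => absurd hj2 (by omega)) (by simp) (fun a ha => absurd ha (by omega))
        (fun h => absurd h (by omega)) j' h1 (by simpa using h2)]
      exact zWhile_eq_bRun cadena.toList j' h1 (by omega)
    have hmain := sel_eq cadena.toList
      ((zLoop cadena.toList.reverse (List.range' 1 (cadena.toList.length - 1))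
          (List.replicate cadena.toList.length 0, 0, 0)).1) hz
      (cadena.toList.length - 1) 1 "Nada".toList 0 1
      (by omega) le_rfl (by omega) (by norm_num) (fun _ => rfl) (fun h => absurd rfl h)
    rw [hT, hmain]
    simp only [Nat.add_sub_cancel]
    by_cases hb0 : (bLoop cadena.toList cadena.toList.length
        ((zLoop cadena.toList.reverse (List.range' 1 (cadena.toList.length - 1))
            (List.replicate cadena.toList.length 0, 0, 0)).1)
        (List.range' 1 (cadena.toList.length / 2)) (0, 1)).1 = 0
    · have hb2 : (bLoop cadena.toList cadena.toList.length
          ((zLoop cadena.toList.reverse (List.range' 1 (cadena.toList.length - 1))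
              (List.replicate cadena.toList.length 0, 0, 0)).1)
          (List.range' 1 (cadena.toList.length / 2)) (0, 1)).2 = 1 := by
        refine bLoop_zero cadena.toList cadena.toList.length _ _ (0, 1) ?_ (fun _ => rfl) hb0
        intro m hm
        have := List.mem_range'_1.mp hm
        omega
      simp only [hb0, hb2, if_pos]
      simp
    · simp only [hb0, reduceIte]
      rfl
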